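-- pv_equiv track=rewrite | github.com/NVIDIA/dgxc-benchmarking | cli/llmb-install/src/llmb_install/cluster/slurm.py | parse_gpu_gres
-- ===== SOURCE A (Python) =====
-- from typing import Any, Dict, List, Optional, Tuple
--
-- def parse_gpu_gres(gres_output: str) -> Optional[int]:
--     """Extract the GPU count from a SLURM GRES string.
--
--     Accepted examples:
--         gpu:8
--         gpu:a100:8
--         gpu:8(S:0-1)
--         gpu:a100:8(S:0-1)
--         gpu:8,mib:100
--         gpu:a100_3g.20gb:2
--
--     Returns an integer within the range 1-8 or *None* when parsing fails.
--     """
--     if not gres_output or gres_output == "(null)" or "gpu:" not in gres_output: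
--         return None
--
--     # Keep the substring after "gpu:" then strip any extras after ',' or '('
--     gpu_part = gres_output.split("gpu:", 1)[1]
--     for sep in (",", "("):
--         gpu_part = gpu_part.split(sep, 1)[0]
--
--     # In cases like 'gpu:a100:8' keep only the numeric part after the last ':'
--     gpu_part = gpu_part.split(":")[-1].strip()
--
--     if not gpu_part.isdigit():
--         return None
--
--     count = int(gpu_part)
--     return count if 1 <= count <= 8 else None
-- ===== SOURCE B (Python) =====
-- from typing import Optional
--
--
-- def parse_gpu_gres(gres_output: str) -> Optional[int]:
--     """Extract the GPU count from a SLURM GRES string (single forward scan)."""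
--     if gres_output == "(null)":
--         return None
--     idx = gres_output.find("gpu:")
--     if idx == -1:
--         return None
--     # One pass over the tail: stop at ',' or '(', restart the token at each ':'
--     chars = []
--     for ch in gres_output[idx + 4:]:
--         if ch == ',' or ch == '(':
--             break
--         if ch == ':':
--             chars = []
--         else:
--             chars.append(ch)
--     token = ''.join(chars).strip()
--     if not token.isdigit():
--         return None
--     count = int(token)
--     return count if 1 <= count <= 8 else None
-- ===== Notes on version B (the rewrite author's own statement) =====
-- stated objective: alternative
-- what changed: Replaces A's chain of three splits plus a last-colon split with one find('gpu:') and a single forward character scan that stops at ',' or '(' and restarts the token at each ':'.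
import Mathlib
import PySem

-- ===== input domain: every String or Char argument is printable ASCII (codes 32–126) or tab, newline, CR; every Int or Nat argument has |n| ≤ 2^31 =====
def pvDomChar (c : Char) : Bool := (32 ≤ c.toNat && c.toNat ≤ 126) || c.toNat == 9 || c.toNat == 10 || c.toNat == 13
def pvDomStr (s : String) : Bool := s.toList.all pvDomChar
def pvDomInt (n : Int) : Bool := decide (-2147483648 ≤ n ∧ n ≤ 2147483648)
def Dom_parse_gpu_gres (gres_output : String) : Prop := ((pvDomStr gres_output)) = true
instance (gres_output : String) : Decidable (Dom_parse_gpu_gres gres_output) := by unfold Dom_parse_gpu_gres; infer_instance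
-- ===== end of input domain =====

-- B replaces A's chain of splits by one find('gpu:') plus a single forward scan; alternative decomposition, same cost.

-- ===== PORT A =====
def parse_gpu_gres (gres_output : String) : Option Int :=
  let s := gres_output.toList
  if s = [] ∨ s = "(null)".toList ∨ PySem.Chars.isIn "gpu:".toList s = false then none
  else
    -- gpu_part = gres_output.split("gpu:", 1)[1]   (index 1 exists: "gpu:" occurs in s)
    let gp0 := ((PySem.Chars.splitMax? s "gpu:".toList 1).getD []).getD 1 []
    -- for sep in (",", "("): gpu_part = gpu_part.split(sep, 1)[0]
    let gp1 := ((PySem.Chars.splitMax? gp0 [','] 1).getD []).getD 0 []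
    let gp2 := ((PySem.Chars.splitMax? gp1 ['('] 1).getD []).getD 0 []
    -- gpu_part = gpu_part.split(":")[-1].strip()   (split(":") is never empty)
    let gp3 := PySem.Chars.strip
      ((PySem.List.pyGet? ((PySem.Chars.split? gp2 [':']).getD []) (-1)).getD [])
    if PySem.Chars.strIsdigit gp3 = false then none
    else
      -- count = int(gpu_part)  (always succeeds: gp3 is a nonempty digit string)
      let count := (PySem.Int.ofChars? gp3).getD 0
      if 1 ≤ count ∧ count ≤ 8 then some count else none

-- ===== PORT B =====
-- the for-loop of Source B over the tail: accumulated token chars, remaining input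
def altScan : List Char → List Char → List Char
  | chars, [] => chars
  | chars, c :: rest =>
    if c = ',' ∨ c = '(' then chars
    else if c = ':' then altScan [] rest
    else altScan (chars ++ [c]) rest

def parse_gpu_gres_alt (gres_output : String) : Option Int :=
  let s := gres_output.toList
  if s = "(null)".toList then none
  else
    let idx := PySem.Chars.find s "gpu:".toList
    if idx = -1 then none
    else
      let token := PySem.Chars.strip (altScan [] (PySem.List.slice s (some (idx + 4)) none))
      if PySem.Chars.strIsdigit token = false then none
      else
        let count := (PySem.Int.ofChars? token).getD 0
        if 1 ≤ count ∧ count ≤ 8 then some count else none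

-- ===== PRECONDITION & SPEC =====
def Spec_parse_gpu_gres (gres_output : String) (out : Option Int) : Prop := out = parse_gpu_gres_alt gres_output
instance (gres_output : String) (out : Option Int) : Decidable (Spec_parse_gpu_gres gres_output out) := by unfold Spec_parse_gpu_gres; infer_instance

-- ===== CLAIM (what is proved, stated in full; the proofs are below) =====
def Claim_equal_parse_gpu_gres : Prop := ∀ (gres_output : String), Dom_parse_gpu_gres gres_output → Spec_parse_gpu_gres gres_output (parse_gpu_gres gres_output)

-- ===== LEMMAS AND PROOFS =====

-- with maxsplit exhausted (m = 0) the splitter flushes the current piece and the rest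
theorem go_zero (sep : List Char) (fuel : Nat) (l cur : List Char) (acc : List (List Char)) :
    PySem.Chars.splitOnMax.go sep fuel 0 l cur acc = acc.reverse ++ [cur.reverse ++ l] := by
  cases fuel with
  | zero => simp [PySem.Chars.splitOnMax.go]
  | succ f => cases l with
    | nil => simp [PySem.Chars.splitOnMax.go]
    | cons c rest => simp [PySem.Chars.splitOnMax.go]

theorem find_go_succ (sub l : List Char) (k : Nat) :
    PySem.Chars.find.go sub l (k+1) =
      if PySem.Chars.find.go sub l k = -1 then -1 else PySem.Chars.find.go sub l k + 1 := by
  induction l generalizing k with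
  | nil => by_cases h : sub.isEmpty <;> simp [PySem.Chars.find.go, h]
  | cons c rest ih =>
    by_cases h : sub.isPrefixOf (c :: rest) <;> simp [PySem.Chars.find.go, h, ih]

theorem find_nil_of_ne (sub : List Char) (h : sub ≠ []) : PySem.Chars.find [] sub = -1 := by
  simp [PySem.Chars.find, PySem.Chars.find.go, h]

theorem find_cons (sub : List Char) (c : Char) (rest : List Char) :
    PySem.Chars.find (c :: rest) sub =
      if sub.isPrefixOf (c :: rest) then 0
      else if PySem.Chars.find rest sub = -1 then -1 else PySem.Chars.find rest sub + 1 := by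
  by_cases h : sub.isPrefixOf (c :: rest)
  · simp [PySem.Chars.find, PySem.Chars.find.go, h]
  · simp [PySem.Chars.find, PySem.Chars.find.go, h, find_go_succ sub rest 0]

-- maxsplit = 1: the splitter cuts at the FIRST occurrence of sep (located by find), or not at all
theorem go_one (sep : List Char) (hsep : sep ≠ []) :
    ∀ (fuel : Nat) (l cur : List Char) (acc : List (List Char)), l.length < fuel →
    PySem.Chars.splitOnMax.go sep fuel 1 l cur acc =
      if PySem.Chars.find l sep = -1 then acc.reverse ++ [cur.reverse ++ l]
      else acc.reverse ++ [cur.reverse ++ l.take (PySem.Chars.find l sep).toNat,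
                           l.drop ((PySem.Chars.find l sep).toNat + sep.length)] := by
  intro fuel
  induction fuel with
  | zero => intro l cur acc h; omega
  | succ f ih =>
    intro l cur acc h
    cases l with
    | nil => simp [PySem.Chars.splitOnMax.go, find_nil_of_ne sep hsep]
    | cons c rest =>
      by_cases hp : sep.isPrefixOf (c :: rest)
      · simp [PySem.Chars.splitOnMax.go, hp, go_zero, find_cons]
      · have hlen : rest.length < f := by simpa using h
        have := ih rest (c :: cur) acc hlen
        by_cases hf : PySem.Chars.find rest sep = -1
        · simp [PySem.Chars.splitOnMax.go, hp, this, hf, find_cons]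
        · have hge : 0 ≤ PySem.Chars.find rest sep := by
            have := PySem.Chars.neg_one_le_find (s := rest) (sub := sep)
            omega
          simp [PySem.Chars.splitOnMax.go, hp, this, hf, find_cons]
          have h1 : PySem.Chars.find rest sep + 1 ≠ -1 := by omega
          have h2 : (PySem.Chars.find rest sep + 1).toNat = (PySem.Chars.find rest sep).toNat + 1 := by omega
          simp [h1, h2, List.take_succ_cons, Nat.add_right_comm]

-- the suffix of l after the LAST occurrence of c (all of l when c does not occur)
def afterLast (c : Char) (l : List Char) : List Char := (l.reverse.takeWhile (· != c)).reverse

theorem takeWhile_eq_self_of_not_contains (c : Char) (l : List Char) (h : l.contains c = false) :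
    l.takeWhile (· != c) = l := by
  apply List.takeWhile_eq_self_iff.mpr
  intro x hx
  simp only [List.contains_eq_mem, decide_eq_false_iff_not] at h
  simp [bne_iff_ne]
  rintro rfl; exact h hx

theorem afterLast_cons (c c' : Char) (l : List Char) :
    afterLast c (c' :: l) =
      if l.contains c then afterLast c l else (if c' = c then l else c' :: l) := by
  unfold afterLast
  have hrev : (c' :: l).reverse = l.reverse ++ [c'] := by simp
  rw [hrev, List.takeWhile_append]
  by_cases h : l.contains c
  · have hne : (l.reverse.takeWhile (· != c)).length ≠ l.reverse.length := by
      intro hlen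
      have heq := (List.takeWhile_prefix (p := (· != c)) (l := l.reverse)).eq_of_length hlen
      have hall := List.takeWhile_eq_self_iff.mp heq
      have hc : c ∈ l := by simpa using h
      have := hall c (by simpa using hc)
      simp at this
    rw [if_neg hne, if_pos h]
  · have heq : l.reverse.takeWhile (· != c) = l.reverse := by
      exact takeWhile_eq_self_of_not_contains c l.reverse (by simpa using h)
    rw [if_pos (by rw [heq]), heq, if_neg (by simpa using h)]
    by_cases hc : c' = c <;> simp [hc, bne_iff_ne]

-- maxsplit = 1 with a single-character separator, phrased with takeWhile/dropWhile
theorem go_one_char (c : Char) :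
    ∀ (fuel : Nat) (l cur : List Char) (acc : List (List Char)), l.length < fuel →
    PySem.Chars.splitOnMax.go [c] fuel 1 l cur acc =
      acc.reverse ++ (if l.contains c
        then [cur.reverse ++ l.takeWhile (· != c), (l.dropWhile (· != c)).tail]
        else [cur.reverse ++ l]) := by
  intro fuel
  induction fuel with
  | zero => intro l cur acc h; omega
  | succ f ih =>
    intro l cur acc h
    cases l with
    | nil => simp [PySem.Chars.splitOnMax.go]
    | cons a rest =>
      by_cases hac : a = c
      · subst hac
        simp [PySem.Chars.splitOnMax.go, List.isPrefixOf, go_zero]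
      · have hlen : rest.length < f := by simpa using h
        have hpre : ([c].isPrefixOf (a :: rest)) = false := by
          simp [List.isPrefixOf]; exact fun hh => absurd hh.symm hac
        rw [PySem.Chars.splitOnMax.go]
        simp only [hpre, Bool.false_eq_true, if_false, if_neg (by omega : ¬ (1:Nat) = 0)]
        rw [ih rest (a :: cur) acc hlen]
        have hca : ¬ c = a := fun hh => hac hh.symm
        by_cases hm : c ∈ rest <;> simp [hca, hm, (by exact hac : a ≠ c)]

-- unlimited split by one character: the LAST piece is the suffix after the last occurrence
theorem splitOn_go_last (c : Char) :
    ∀ (fuel : Nat) (l cur : List Char) (acc : List (List Char)), l.length < fuel →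
    (PySem.Chars.splitOn.go [c] fuel l cur acc).getLast? =
      some (if l.contains c then afterLast c l else cur.reverse ++ l) := by
  intro fuel
  induction fuel with
  | zero => intro l cur acc h; omega
  | succ f ih =>
    intro l cur acc h
    cases l with
    | nil => simp [PySem.Chars.splitOn.go]
    | cons a rest =>
      have hlen : rest.length < f := by simpa using h
      by_cases hac : a = c
      · subst hac
        have hpre : ([a].isPrefixOf (a :: rest)) = true := by simp [List.isPrefixOf]
        rw [PySem.Chars.splitOn.go]
        simp only [hpre, if_pos]
        have hd : List.drop [a].length (a :: rest) = rest := by simp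
        rw [hd, ih rest [] (cur.reverse :: acc) hlen]
        rw [afterLast_cons]
        by_cases hm : a ∈ rest <;> simp [hm]
      · have hpre : ([c].isPrefixOf (a :: rest)) = false := by
          simp [List.isPrefixOf]; exact fun hh => absurd hh.symm hac
        rw [PySem.Chars.splitOn.go]
        simp only [hpre, Bool.false_eq_true, if_false]
        rw [ih rest (a :: cur) acc hlen]
        rw [afterLast_cons]
        have hca : ¬ c = a := fun hh => hac hh.symm
        by_cases hm : c ∈ rest <;> simp [hm, hca]

theorem pyGet?_neg_one {α : Type} (xs : List α) (h : xs ≠ []) :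
    PySem.List.pyGet? xs (-1) = xs.getLast? := by
  have hlen : 1 ≤ xs.length := List.length_pos_iff.mpr h
  have h1 : -(xs.length : Int) ≤ -1 := by omega
  simp [PySem.List.pyGet?, PySem.List.pyIdx?, h1, List.getLast?_eq_getElem?]

-- the characters Source B keeps while scanning (not a terminator)
def keepP (a : Char) : Bool := !(a == ',' || a == '(')

-- Source B's loop computes: cut the tail at ',' or '(', keep what follows the last ':'
theorem altScan_eq (l : List Char) : ∀ (chars : List Char),
    altScan chars l =
      (if (l.takeWhile keepP).contains ':'
       then afterLast ':' (l.takeWhile keepP)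
       else chars ++ l.takeWhile keepP) := by
  induction l with
  | nil => simp [altScan]
  | cons a rest ih =>
    intro chars
    by_cases hstop : a = ',' ∨ a = '('
    · have hk : keepP a = false := by
        unfold keepP; rcases hstop with rfl | rfl <;> simp
      rw [List.takeWhile_cons, hk]
      simp [altScan, hstop]
    · have hk : keepP a = true := by
        rcases not_or.mp hstop with ⟨h1, h2⟩
        unfold keepP
        simp [h1, h2]
      rw [List.takeWhile_cons, hk]
      simp only [if_pos]
      by_cases hcol : a = ':'
      · subst hcol
        rw [show altScan chars (':' :: rest) = altScan [] rest from by simp [altScan]]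
        rw [ih [], afterLast_cons]
        simp only [List.contains_cons, beq_self_eq_true, Bool.true_or, if_pos]
        by_cases hm : ':' ∈ rest.takeWhile keepP <;> simp [hm]
      · rw [show altScan chars (a :: rest) = altScan (chars ++ [a]) rest from by
          simp [altScan, hstop, hcol]]
        rw [ih (chars ++ [a]), afterLast_cons]
        have hne : (':' == a) = false := by simp; exact fun hh => hcol hh.symm
        simp only [List.contains_cons, hne, Bool.false_or]
        by_cases hmem : ':' ∈ List.takeWhile keepP rest <;> simp [hmem]

-- A's two one-character cuts compose into B's single keepP cut
theorem takeWhile_comma_paren (l : List Char) :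
    (l.takeWhile (· != ',')).takeWhile (· != '(') = l.takeWhile keepP := by
  rw [List.takeWhile_takeWhile]
  congr 1
  funext a
  unfold keepP
  by_cases h1 : a = ',' <;> by_cases h2 : a = '(' <;> simp [h1, h2]

-- first element of a maxsplit-1 split on one character: everything before the first occurrence
theorem cut_one (l : List Char) (c : Char) :
    (((PySem.Chars.splitMax? l [c] 1).getD []).getD 0 []) = l.takeWhile (· != c) := by
  have h1 : PySem.Chars.splitMax? l [c] 1 = some (PySem.Chars.splitOnMax l [c] 1) := by
    simp [PySem.Chars.splitMax?]
  rw [h1]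
  have h2 : PySem.Chars.splitOnMax l [c] 1 =
      PySem.Chars.splitOnMax.go [c] (l.length + 1) 1 l [] [] := by
    simp [PySem.Chars.splitOnMax]
  rw [h2, go_one_char c (l.length + 1) l [] [] (by omega)]
  by_cases hcont : l.contains c
  · have hm : c ∈ l := by simpa using hcont
    simp [hm]
  · have hm : c ∉ l := by simpa using hcont
    simp [hm, takeWhile_eq_self_of_not_contains c l (by simpa using hcont)]

-- split(":")[-1]: the suffix after the last ':' (or the whole piece)
theorem last_piece (l : List Char) :
    ((PySem.List.pyGet? ((PySem.Chars.split? l [':']).getD []) (-1)).getD []) =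
      (if l.contains ':' then afterLast ':' l else l) := by
  have h1 : PySem.Chars.split? l [':'] = some (PySem.Chars.splitOn l [':']) := by
    simp [PySem.Chars.split?]
  have h2 : PySem.Chars.splitOn l [':'] = PySem.Chars.splitOn.go [':'] (l.length + 1) l [] [] := by
    simp [PySem.Chars.splitOn]
  have hres := splitOn_go_last ':' (l.length + 1) l [] [] (by omega)
  have hne : PySem.Chars.splitOn.go [':'] (l.length + 1) l [] [] ≠ [] := by
    intro h0; rw [h0] at hres; simp at hres
  rw [h1, h2]
  simp only [Option.getD_some]
  rw [pyGet?_neg_one _ hne, hres]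
  simp

-- ===== VERDICT (by name: the statement is the Claim_ definition above) =====
theorem parse_gpu_gres_spec : Claim_equal_parse_gpu_gres := by
  intro gres _
  unfold Spec_parse_gpu_gres parse_gpu_gres parse_gpu_gres_alt
  rw [show ("gpu:".toList) = ['g','p','u',':'] from by decide]
  by_cases hnull : gres.toList = "(null)".toList
  · simp [hnull]
  by_cases hfind : PySem.Chars.find gres.toList ['g','p','u',':'] = -1
  · simp [PySem.Chars.isIn, hfind]
  · have hge : 0 ≤ PySem.Chars.find gres.toList ['g','p','u',':'] := by
      have := PySem.Chars.neg_one_le_find (s := gres.toList) (sub := ['g','p','u',':'])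
      omega
    obtain ⟨k, hk⟩ : ∃ k : Nat, PySem.Chars.find gres.toList ['g','p','u',':'] = (k : Int) :=
      ⟨(PySem.Chars.find gres.toList ['g','p','u',':']).toNat, by omega⟩
    have hsnil : gres.toList ≠ [] := by
      intro h0
      exact hfind (by rw [h0]; exact find_nil_of_ne _ (by decide))
    have hisin : PySem.Chars.isIn ['g','p','u',':'] gres.toList = true := by
      simp [PySem.Chars.isIn, hfind]
    rw [if_neg (by
      rintro (h | h | h)
      · exact hsnil h
      · exact hnull h
      · simp [hisin] at h)]
    rw [if_neg hnull, if_neg hfind]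
    have hsplit1 : ((PySem.Chars.splitMax? gres.toList ['g','p','u',':'] 1).getD []).getD 1 [] =
        gres.toList.drop (k + 4) := by
      have h1 : PySem.Chars.splitMax? gres.toList ['g','p','u',':'] 1 =
          some (PySem.Chars.splitOnMax.go ['g','p','u',':'] (gres.toList.length + 1) 1 gres.toList [] []) := by
        simp [PySem.Chars.splitMax?, PySem.Chars.splitOnMax]
      rw [h1, go_one ['g','p','u',':'] (by decide) (gres.toList.length + 1) gres.toList [] [] (by omega)]
      rw [if_neg hfind]
      simp [hk]
    have hslice : PySem.List.slice gres.toList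
        (some (PySem.Chars.find gres.toList ['g','p','u',':'] + 4)) none =
        gres.toList.drop (k + 4) := by
      rw [hk]
      have hcast : (some ((k : Int) + 4) : Option Int) = some (((k + 4 : Nat) : Int)) := by
        push_cast; ring_nf
      rw [hcast, PySem.List.slice_from_natCast]
    simp only [hsplit1, hslice, cut_one, takeWhile_comma_paren, last_piece, altScan_eq,
      List.nil_append]
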